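-- pv_equiv track=rewrite | github.com/cosarara/blue-spider | bluespider/mapped.py | build_imgdata
-- ===== SOURCE A (Python) =====
-- def build_imgdata(data, size, w):
--     ''' With no pal '''
--     tiles_per_line = w
--     imw, imh = size
--     imdata = [0]*imw*imh
--     for pos in range(len(data)):
--         tile = pos // (8*4) # At 2 pixels per byte, we have 8*8/2 bytes per tile
--         x = ((pos-(tile*8*4))%4)*2+((tile % tiles_per_line)*8)
--         y = (pos-(tile*8*4))//4 + (tile//tiles_per_line*8)
--
--         color2 = ((data[pos] >> 4) & 0xF)
--         color1 = data[pos] & 0xF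
--         imdata[x+y*imw] = color1
--         imdata[x+y*imw+1] = color2
--     return imdata
-- ===== SOURCE B (Python) =====
-- def build_imgdata(data, size, w):
--     ''' With no pal '''
--     imw, imh = size
--     imdata = [0]*imw*imh
--     n = len(data)
--     tiles = (n + 31) // 32
--     pos = 0
--     for tile_y in range((tiles + w - 1) // w):
--         for tile_x in range(w):
--             for row in range(8):
--                 for col in range(4):
--                     if pos >= n:
--                         return imdata
--                     b = data[pos]
--                     x = tile_x*8 + col*2
--                     y = tile_y*8 + row
--                     imdata[x + y*imw] = b & 0xF
--                     imdata[x + y*imw + 1] = (b >> 4) & 0xF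
--                     pos += 1
--     return imdata
-- ===== Notes on version B (the rewrite author's own statement) =====
-- stated objective: alternative
-- what changed: B replaces A's flat byte loop, which decodes each position into image coordinates with //, % and modular tile arithmetic, by a nested traversal over tile rows, tiles, pixel rows and byte columns that builds the coordinates directly from the loop counters (no division or modulo per byte) and stops via an early return after exactly len(data) bytes; …
-- outside the precondition, e.g. on build_imgdata([], (2, 2), 0): A returns [0, 0, 0, 0], B raises ZeroDivisionError
import Mathlib
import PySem

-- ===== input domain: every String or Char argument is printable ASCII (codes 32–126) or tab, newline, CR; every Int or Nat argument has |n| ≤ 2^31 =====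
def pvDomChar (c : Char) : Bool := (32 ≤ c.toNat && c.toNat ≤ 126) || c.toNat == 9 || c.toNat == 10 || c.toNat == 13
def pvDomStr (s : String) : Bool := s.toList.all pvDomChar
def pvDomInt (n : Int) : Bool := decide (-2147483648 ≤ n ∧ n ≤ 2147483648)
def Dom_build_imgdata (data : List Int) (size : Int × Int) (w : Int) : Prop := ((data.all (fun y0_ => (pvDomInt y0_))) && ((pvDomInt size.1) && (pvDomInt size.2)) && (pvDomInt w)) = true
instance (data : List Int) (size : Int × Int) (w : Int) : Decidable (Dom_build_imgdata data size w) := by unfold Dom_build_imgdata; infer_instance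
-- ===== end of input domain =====

-- B scatters the same bytes via nested tile/row/column counters (coordinates built directly from
-- the counters, no per-byte division) instead of A's flat loop with //-and-% decoding; return
-- values proved equal on Pre_ (w >= 1 and every write inside the buffer, i.e. where A returns).


-- ===== PORT A =====
-- literal port of A: '[0]*imw*imh' = replicate (imw.toNat * imh.toNat); '(d >> 4) & 0xF' and
-- 'd & 0xF' are ported as floor-division/Python-mod by 16, exact for every Int; 'imdata[i] = v'
-- is List.set at the index's toNat, exact inside Pre_ (index nonnegative and in range there).
def build_imgdata (data : List Int) (size : Int × Int) (w : Int) : List Int :=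
  let tiles_per_line := w
  let imw := size.1
  let imh := size.2
  let init : List Int := List.replicate (imw.toNat * imh.toNat) 0
  (List.range data.length).foldl (fun (imdata : List Int) (pos : Nat) =>
    let tile : Int := PySem.Int.floordiv (pos : Int) (8*4)
    let x : Int := (PySem.Int.mod ((pos : Int) - tile*8*4) 4)*2 + (PySem.Int.mod tile tiles_per_line)*8
    let y : Int := PySem.Int.floordiv ((pos : Int) - tile*8*4) 4 + (PySem.Int.floordiv tile tiles_per_line)*8
    let d : Int := data.getD pos 0
    let color2 : Int := PySem.Int.mod (PySem.Int.floordiv d 16) 16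
    let color1 : Int := PySem.Int.mod d 16
    (imdata.set (x + y*imw).toNat color1).set ((x + y*imw).toNat + 1) color2) init

-- ===== PORT B =====
-- literal port of B (Source B): nested loops over tile rows, tiles per line, pixel rows and byte
-- columns with a running byte counter. Python's early 'return imdata' (checked as the first
-- statement of the innermost body, and cutting off all four loops at once) is rendered by the
-- loop combinator pvLoop, which stops as soon as the stop condition holds; 'range(k)' for an
-- int k runs max(k,0) times = k.toNat; bit masks ported as in A.
def pvLoop {σ : Type} (stop : σ → Prop) [DecidablePred stop] (F : σ → Nat → σ) : Nat → Nat → σ → σ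
  | _, 0, st => st
  | i, k + 1, st => if stop st then st else pvLoop stop F (i + 1) k (F st i)

def build_imgdata_alt (data : List Int) (size : Int × Int) (w : Int) : List Int :=
  let imw := size.1
  let imh := size.2
  let imdata : List Int := List.replicate (imw.toNat * imh.toNat) 0
  let n := data.length
  let tiles : Int := PySem.Int.floordiv ((n : Int) + 31) 32
  let stop : List Int × Nat → Prop := fun st => n ≤ st.2
  let st := pvLoop stop (fun st tile_y =>
      pvLoop stop (fun st tile_x =>
        pvLoop stop (fun st row =>
          pvLoop stop (fun st col =>
            let b : Int := data.getD st.2 0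
            let x : Int := (tile_x : Int) * 8 + (col : Int) * 2
            let y : Int := (tile_y : Int) * 8 + (row : Int)
            ((st.1.set (x + y * imw).toNat (PySem.Int.mod b 16)).set
              ((x + y * imw).toNat + 1) (PySem.Int.mod (PySem.Int.floordiv b 16) 16),
             st.2 + 1)) 0 4 st) 0 8 st) 0 w.toNat st)
    0 (PySem.Int.floordiv (tiles + w - 1) w).toNat (imdata, 0)
  st.1

-- ===== PRECONDITION & SPEC =====
-- Pre_ = the inputs where A returns normally with a positive tiles-per-line: w ≥ 1 and every
-- byte's two destination pixels lie inside the buffer (otherwise Python A raises IndexError;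
-- w = 0 raises ZeroDivisionError). It also excludes w ≤ -1, where A can still return a value
-- shaped by Python's floor division with a negative divisor — an accident B does not reproduce
-- (see claim cites).
def Pre_build_imgdata (data : List Int) (size : Int × Int) (w : Int) : Prop :=
  1 ≤ w ∧ ∀ pos : Nat, pos < data.length →
    pos % 32 % 4 * 2 + pos / 32 % w.toNat * 8
      + (pos % 32 / 4 + pos / 32 / w.toNat * 8) * size.1.toNat + 1
      < size.1.toNat * size.2.toNat
instance (data : List Int) (size : Int × Int) (w : Int) : Decidable (Pre_build_imgdata data size w) := by
  unfold Pre_build_imgdata; infer_instance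

def pvWitness_build_imgdata : List Int × (Int × Int) × Int := ([18, 255, 0], ((8, 8), 1))

def Spec_build_imgdata (data : List Int) (size : Int × Int) (w : Int) (out : List Int) : Prop := out = build_imgdata_alt data size w
instance (data : List Int) (size : Int × Int) (w : Int) (out : List Int) : Decidable (Spec_build_imgdata data size w out) := by unfold Spec_build_imgdata; infer_instance

-- ===== CLAIM (what is proved, stated in full; the proofs are below) =====
def Claim_equal_build_imgdata : Prop := ∀ (data : List Int) (size : Int × Int) (w : Int), Dom_build_imgdata data size w → Pre_build_imgdata data size w → Spec_build_imgdata data size w (build_imgdata data size w)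

-- ===== LEMMAS AND PROOFS =====

-- proof-side helpers: byte nibbles, the destination index of byte c, the per-byte scatter step,
-- and the counted step used to flatten B's nested loops
def c1v (data : List Int) (pos : Nat) : Int := PySem.Int.mod (data.getD pos 0) 16
def c2v (data : List Int) (pos : Nat) : Int := PySem.Int.mod (PySem.Int.floordiv (data.getD pos 0) 16) 16
def pvIN (imw : Int) (W c : Nat) : Nat :=
  (((c % 32 % 4 : Nat) : Int) * 2 + ((c / 32 % W : Nat) : Int) * 8
    + (((c % 32 / 4 : Nat) : Int) + ((c / 32 / W : Nat) : Int) * 8) * imw).toNat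
def pvStepN (data : List Int) (imw : Int) (W : Nat) (imdata : List Int) (pos : Nat) : List Int :=
  (imdata.set (pvIN imw W pos) (c1v data pos)).set (pvIN imw W pos + 1) (c2v data pos)
def pvStepC (data : List Int) (imw : Int) (W n : Nat) (st : List Int × Nat) (c : Nat) : List Int × Nat :=
  if n ≤ st.2 then st
  else ((st.1.set (pvIN imw W c) (c1v data st.2)).set (pvIN imw W c + 1) (c2v data st.2), st.2 + 1)

theorem pv_decomp_mod (a b k : Nat) (ha : a < k) : (a + b * k) % k = a := by
  rw [Nat.add_mul_mod_self_right, Nat.mod_eq_of_lt ha]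

theorem pv_decomp_div (a b k : Nat) (ha : a < k) : (a + b * k) / k = b := by
  rw [Nat.add_mul_div_right _ _ (by omega : 0 < k), Nat.div_eq_of_lt ha]; omega

theorem pv_foldl_range_mul {σ : Type} (f : σ → Nat → σ) (a b : Nat) (init : σ) :
    (List.range a).foldl (fun st i => (List.range b).foldl (fun st j => f st (i * b + j)) st) init
    = (List.range (a * b)).foldl f init := by
  induction a generalizing init with
  | zero => simp
  | succ k ih =>
    rw [List.range_succ, List.foldl_append, List.foldl_cons, List.foldl_nil, ih]
    rw [show (k + 1) * b = k * b + b from by ring, List.range_add, List.foldl_append,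
      List.foldl_map]

theorem pv_guard_stable {σ : Type} (stop : σ → Prop) [DecidablePred stop] (F : σ → Nat → σ)
    (l : List Nat) : ∀ st : σ, stop st →
      l.foldl (fun st j => if stop st then st else F st j) st = st := by
  induction l with
  | nil => intro st _; rfl
  | cons a t ih =>
    intro st h
    rw [List.foldl_cons, if_pos h]
    exact ih st h

theorem pv_loop_eq {σ : Type} (stop : σ → Prop) [DecidablePred stop] (F : σ → Nat → σ) :
    ∀ (k i : Nat) (st : σ), pvLoop stop F i k st
      = (List.range' i k).foldl (fun st j => if stop st then st else F st j) st := by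
  intro k
  induction k with
  | zero => intro i st; rfl
  | succ m ih =>
    intro i st
    rw [List.range'_succ, List.foldl_cons]
    show (if stop st then st else pvLoop stop F (i + 1) m (F st i)) = _
    by_cases h : stop st
    · rw [if_pos h, if_pos h, pv_guard_stable stop F _ st h]
    · rw [if_neg h, if_neg h]
      exact ih (i + 1) (F st i)

theorem pv_stepC_stable (data : List Int) (imw : Int) (W n : Nat) (g : Nat → Nat) (l : List Nat) :
    ∀ st : List Int × Nat, n ≤ st.2 →
      l.foldl (fun st z => pvStepC data imw W n st (g z)) st = st := by
  induction l with
  | nil => intro st _; rfl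
  | cons a t ih =>
    intro st h
    rw [List.foldl_cons,
      show pvStepC data imw W n st (g a) = st from by unfold pvStepC; rw [if_pos h]]
    exact ih st h

theorem pv_invar (data : List Int) (imw : Int) (W : Nat) (init : List Int) (M : Nat) :
    (List.range M).foldl (pvStepC data imw W data.length) (init, 0)
    = ((List.range (min M data.length)).foldl (pvStepN data imw W) init,
       min M data.length) := by
  induction M with
  | zero => simp
  | succ k ih =>
    rw [List.range_succ, List.foldl_append, List.foldl_cons, List.foldl_nil, ih]
    by_cases h : data.length ≤ k
    · have h1 : min k data.length = data.length := by omega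
      have h2 : min (k + 1) data.length = data.length := by omega
      rw [h1, h2]
      unfold pvStepC
      rw [if_pos (le_refl _)]
    · have h1 : min k data.length = k := by omega
      have h2 : min (k + 1) data.length = k + 1 := by omega
      rw [h1, h2]
      unfold pvStepC
      rw [if_neg (show ¬ data.length ≤ (Prod.mk ((List.range k).foldl (pvStepN data imw W) init) k).2 from by simp; omega)]
      rw [List.range_succ, List.foldl_append, List.foldl_cons, List.foldl_nil]
      rfl

theorem pv_count (n W : Nat) (hW : 1 ≤ W) :
    n ≤ ((n + 31) / 32 + W - 1) / W * (W * 32) := by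
  have h1 : n ≤ (n + 31) / 32 * 32 := by omega
  have h2 := Nat.div_add_mod ((n + 31) / 32 + W - 1) W
  have h3 : ((n + 31) / 32 + W - 1) % W < W := Nat.mod_lt _ (by omega)
  have h4 : (n + 31) / 32 ≤ ((n + 31) / 32 + W - 1) / W * W := by
    have e : ((n + 31) / 32 + W - 1) / W * W = W * (((n + 31) / 32 + W - 1) / W) :=
      Nat.mul_comm _ _
    omega
  have h5 : (n + 31) / 32 * 32 ≤ ((n + 31) / 32 + W - 1) / W * W * 32 :=
    Nat.mul_le_mul_right _ h4
  have e2 : ((n + 31) / 32 + W - 1) / W * W * 32 = ((n + 31) / 32 + W - 1) / W * (W * 32) := by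
    ring
  omega

-- ===== VERDICT (by name: the statement is the Claim_ definition above) =====
theorem build_imgdata_spec : Claim_equal_build_imgdata := by
  intro data size w _ hpre
  obtain ⟨imw, imh⟩ := size
  obtain ⟨hw, _⟩ := hpre
  obtain ⟨W, rfl⟩ : ∃ W : Nat, w = (W : Int) := ⟨w.toNat, (Int.toNat_of_nonneg (by omega)).symm⟩
  have hW1 : 1 ≤ W := by exact_mod_cast hw
  unfold Spec_build_imgdata build_imgdata build_imgdata_alt
  simp only
  -- A side: each step of the flat fold is the scatter step at its byte position
  have hstepA : ∀ (imdata : List Int), ∀ pos ∈ List.range data.length,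
      ((imdata.set
          ((PySem.Int.mod ((pos : Int) - PySem.Int.floordiv ((pos : Int)) (8 * 4) * 8 * 4) 4 * 2 +
              PySem.Int.mod (PySem.Int.floordiv ((pos : Int)) (8 * 4)) (W : Int) * 8 +
            (PySem.Int.floordiv ((pos : Int) - PySem.Int.floordiv ((pos : Int)) (8 * 4) * 8 * 4) 4 +
                PySem.Int.floordiv (PySem.Int.floordiv ((pos : Int)) (8 * 4)) (W : Int) * 8) *
              imw).toNat)
          (PySem.Int.mod (data.getD pos 0) 16)).set
        ((PySem.Int.mod ((pos : Int) - PySem.Int.floordiv ((pos : Int)) (8 * 4) * 8 * 4) 4 * 2 +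
              PySem.Int.mod (PySem.Int.floordiv ((pos : Int)) (8 * 4)) (W : Int) * 8 +
            (PySem.Int.floordiv ((pos : Int) - PySem.Int.floordiv ((pos : Int)) (8 * 4) * 8 * 4) 4 +
                PySem.Int.floordiv (PySem.Int.floordiv ((pos : Int)) (8 * 4)) (W : Int) * 8) *
              imw).toNat +
          1)
        (PySem.Int.mod (PySem.Int.floordiv (data.getD pos 0) 16) 16))
      = pvStepN data imw W imdata pos := by
    intro imdata pos _
    have htile : PySem.Int.floordiv ((pos : Int)) (8 * 4) = ((pos / 32 : Nat) : Int) := by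
      exact_mod_cast PySem.Int.floordiv_natCast pos 32
    simp only [htile]
    have hsub : (pos : Int) - ((pos / 32 : Nat) : Int) * 8 * 4 = ((pos % 32 : Nat) : Int) := by
      push_cast; omega
    simp only [hsub]
    have hm4 : PySem.Int.mod ((pos % 32 : Nat) : Int) 4 = ((pos % 32 % 4 : Nat) : Int) := by
      exact_mod_cast PySem.Int.mod_natCast (pos % 32) 4
    have hmW : PySem.Int.mod ((pos / 32 : Nat) : Int) (W : Int)
        = ((pos / 32 % W : Nat) : Int) := PySem.Int.mod_natCast _ _
    have hd4 : PySem.Int.floordiv ((pos % 32 : Nat) : Int) 4 = ((pos % 32 / 4 : Nat) : Int) := by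
      exact_mod_cast PySem.Int.floordiv_natCast (pos % 32) 4
    have hdW : PySem.Int.floordiv ((pos / 32 : Nat) : Int) (W : Int)
        = ((pos / 32 / W : Nat) : Int) := PySem.Int.floordiv_natCast _ _
    simp only [hm4, hmW, hd4, hdW]
    rfl
  have eA := PySem.List.foldl_congr_mem _ _ _
    (List.replicate (imw.toNat * imh.toNat) (0 : Int)) hstepA
  -- B side, step 1: the loop body at counters (ty, tx, row, col) is the counted step at
  -- c = ty*(W*32) + (tx*32 + (row*4 + col))
  have hbody : ∀ (st : List Int × Nat) (ty tx row col : Nat), tx < W → row < 8 → col < 4 →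
      (if data.length ≤ st.2 then st
       else ((st.1.set (((tx : Int) * 8 + (col : Int) * 2 + ((ty : Int) * 8 + (row : Int)) * imw).toNat)
                (PySem.Int.mod (data.getD st.2 0) 16)).set
              (((tx : Int) * 8 + (col : Int) * 2 + ((ty : Int) * 8 + (row : Int)) * imw).toNat + 1)
              (PySem.Int.mod (PySem.Int.floordiv (data.getD st.2 0) 16) 16),
             st.2 + 1))
      = pvStepC data imw W data.length st (ty * (W * 32) + (tx * 32 + (row * 4 + col))) := by
    intro st ty tx row col htx hrow hcol
    have e : ty * (W * 32) + (tx * 32 + (row * 4 + col))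
        = (row * 4 + col) + (tx + ty * W) * 32 := by ring
    have h32 : row * 4 + col < 32 := by omega
    have m1 : (ty * (W * 32) + (tx * 32 + (row * 4 + col))) % 32 = row * 4 + col := by
      rw [e]; exact pv_decomp_mod _ _ _ h32
    have d1 : (ty * (W * 32) + (tx * 32 + (row * 4 + col))) / 32 = tx + ty * W := by
      rw [e]; exact pv_decomp_div _ _ _ h32
    have hIN : pvIN imw W (ty * (W * 32) + (tx * 32 + (row * 4 + col)))
        = ((tx : Int) * 8 + (col : Int) * 2 + ((ty : Int) * 8 + (row : Int)) * imw).toNat := by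
      unfold pvIN
      rw [m1, d1, pv_decomp_mod _ _ _ htx, pv_decomp_div _ _ _ htx,
        show (row * 4 + col) % 4 = col from by omega,
        show (row * 4 + col) / 4 = row from by omega]
      congr 1
      ring
    unfold pvStepC
    rw [hIN]
    rfl
  -- B side, steps 2-4: each pvLoop is the guarded fold over its range; guards at the outer
  -- levels are redundant (a stopped state passes through), and the nested folds flatten into
  -- one counted fold
  have hP4 : ∀ (st : List Int × Nat) (ty tx row : Nat), tx < W → row < 8 →
      pvLoop (fun st : List Int × Nat => data.length ≤ st.2) (fun st col =>
        ((st.1.set (((tx : Int) * 8 + (col : Int) * 2 + ((ty : Int) * 8 + (row : Int)) * imw).toNat)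
            (PySem.Int.mod (data.getD st.2 0) 16)).set
          (((tx : Int) * 8 + (col : Int) * 2 + ((ty : Int) * 8 + (row : Int)) * imw).toNat + 1)
          (PySem.Int.mod (PySem.Int.floordiv (data.getD st.2 0) 16) 16),
         st.2 + 1)) 0 4 st
      = (List.range 4).foldl (fun st col =>
          pvStepC data imw W data.length st (ty * (W * 32) + (tx * 32 + (row * 4 + col)))) st := by
    intro st ty tx row htx hrow
    rw [pv_loop_eq, show List.range' 0 4 = List.range 4 from (List.range_eq_range').symm]
    exact PySem.List.foldl_congr_mem _ _ _ st
      (fun st2 col hcol => hbody st2 ty tx row col htx hrow (List.mem_range.mp hcol))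
  have hP3 : ∀ (st : List Int × Nat) (ty tx : Nat), tx < W →
      pvLoop (fun st : List Int × Nat => data.length ≤ st.2) (fun st row =>
        pvLoop (fun st : List Int × Nat => data.length ≤ st.2) (fun st col =>
          ((st.1.set (((tx : Int) * 8 + (col : Int) * 2 + ((ty : Int) * 8 + (row : Int)) * imw).toNat)
              (PySem.Int.mod (data.getD st.2 0) 16)).set
            (((tx : Int) * 8 + (col : Int) * 2 + ((ty : Int) * 8 + (row : Int)) * imw).toNat + 1)
            (PySem.Int.mod (PySem.Int.floordiv (data.getD st.2 0) 16) 16),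
           st.2 + 1)) 0 4 st) 0 8 st
      = (List.range 32).foldl (fun st z =>
          pvStepC data imw W data.length st (ty * (W * 32) + (tx * 32 + z))) st := by
    intro st ty tx htx
    rw [pv_loop_eq, show List.range' 0 8 = List.range 8 from (List.range_eq_range').symm]
    refine (PySem.List.foldl_congr_mem _ _ _ st (fun st2 row hrow => ?_)).trans
      (pv_foldl_range_mul
        (fun st z => pvStepC data imw W data.length st (ty * (W * 32) + (tx * 32 + z))) 8 4 st)
    by_cases h : data.length ≤ st2.2
    · rw [if_pos h, pv_stepC_stable data imw W data.length _ _ st2 h]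
    · rw [if_neg h]
      exact hP4 st2 ty tx row htx (List.mem_range.mp hrow)
  have hP2 : ∀ (st : List Int × Nat) (ty : Nat),
      pvLoop (fun st : List Int × Nat => data.length ≤ st.2) (fun st tx =>
        pvLoop (fun st : List Int × Nat => data.length ≤ st.2) (fun st row =>
          pvLoop (fun st : List Int × Nat => data.length ≤ st.2) (fun st col =>
            ((st.1.set (((tx : Int) * 8 + (col : Int) * 2 + ((ty : Int) * 8 + (row : Int)) * imw).toNat)
                (PySem.Int.mod (data.getD st.2 0) 16)).set
              (((tx : Int) * 8 + (col : Int) * 2 + ((ty : Int) * 8 + (row : Int)) * imw).toNat + 1)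
              (PySem.Int.mod (PySem.Int.floordiv (data.getD st.2 0) 16) 16),
             st.2 + 1)) 0 4 st) 0 8 st) 0 ((W : Int)).toNat st
      = (List.range (W * 32)).foldl (fun st u =>
          pvStepC data imw W data.length st (ty * (W * 32) + u)) st := by
    intro st ty
    rw [show ((W : Int)).toNat = W from Int.toNat_natCast W]
    rw [pv_loop_eq, show List.range' 0 W = List.range W from (List.range_eq_range').symm]
    refine (PySem.List.foldl_congr_mem _ _ _ st (fun st2 tx htx => ?_)).trans
      (pv_foldl_range_mul
        (fun st u => pvStepC data imw W data.length st (ty * (W * 32) + u)) W 32 st)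
    by_cases h : data.length ≤ st2.2
    · rw [if_pos h, pv_stepC_stable data imw W data.length _ _ st2 h]
    · rw [if_neg h]
      exact hP3 st2 ty tx (List.mem_range.mp htx)
  -- the outer trip count is ceil(ceil(n/32)/W)
  have hQ : (PySem.Int.floordiv
        (PySem.Int.floordiv ((data.length : Int) + 31) 32 + (W : Int) - 1) (W : Int)).toNat
      = ((data.length + 31) / 32 + W - 1) / W := by
    have e1 : PySem.Int.floordiv ((data.length : Int) + 31) 32
        = (((data.length + 31 : Nat) / 32 : Nat) : Int) := by
      rw [show ((data.length : Int) + 31) = ((data.length + 31 : Nat) : Int) from by push_cast; ring]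
      exact_mod_cast PySem.Int.floordiv_natCast (data.length + 31) 32
    rw [e1]
    rw [show (((data.length + 31 : Nat) / 32 : Nat) : Int) + (W : Int) - 1
        = (((data.length + 31) / 32 + W - 1 : Nat) : Int) from by push_cast; omega]
    rw [PySem.Int.floordiv_natCast]
    exact Int.toNat_natCast _
  rw [hQ]
  have hP1 :
      pvLoop (fun st : List Int × Nat => data.length ≤ st.2) (fun st ty =>
        pvLoop (fun st : List Int × Nat => data.length ≤ st.2) (fun st tx =>
          pvLoop (fun st : List Int × Nat => data.length ≤ st.2) (fun st row =>
            pvLoop (fun st : List Int × Nat => data.length ≤ st.2) (fun st col =>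
              ((st.1.set (((tx : Int) * 8 + (col : Int) * 2 + ((ty : Int) * 8 + (row : Int)) * imw).toNat)
                  (PySem.Int.mod (data.getD st.2 0) 16)).set
                (((tx : Int) * 8 + (col : Int) * 2 + ((ty : Int) * 8 + (row : Int)) * imw).toNat + 1)
                (PySem.Int.mod (PySem.Int.floordiv (data.getD st.2 0) 16) 16),
               st.2 + 1)) 0 4 st) 0 8 st) 0 ((W : Int)).toNat st)
        0 (((data.length + 31) / 32 + W - 1) / W)
        (List.replicate (imw.toNat * imh.toNat) 0, 0)
      = ((List.range (((data.length + 31) / 32 + W - 1) / W * (W * 32))).foldl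
          (pvStepC data imw W data.length)
          (List.replicate (imw.toNat * imh.toNat) 0, 0)) := by
    rw [pv_loop_eq, show List.range' 0 (((data.length + 31) / 32 + W - 1) / W)
        = List.range (((data.length + 31) / 32 + W - 1) / W)
        from (List.range_eq_range').symm]
    refine (PySem.List.foldl_congr_mem _ _ _ _ (fun st2 ty hty => ?_)).trans
      (pv_foldl_range_mul (pvStepC data imw W data.length) _ (W * 32) _)
    by_cases h : data.length ≤ st2.2
    · rw [if_pos h, pv_stepC_stable data imw W data.length _ _ st2 h]
    · rw [if_neg h]
      exact hP2 st2 ty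
  have eB := hP1.trans (pv_invar data imw W (List.replicate (imw.toNat * imh.toNat) 0)
    (((data.length + 31) / 32 + W - 1) / W * (W * 32)))
  have hmin : min (((data.length + 31) / 32 + W - 1) / W * (W * 32)) data.length
      = data.length := by
    have := pv_count data.length W hW1
    omega
  rw [hmin] at eB
  exact eA.trans (congrArg Prod.fst eB).symm
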